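-- pv_equiv track=rewrite | github.com/cyruszzhou/imagenetcheck | ops.py | simplestate
-- ===== SOURCE A (Python) =====
-- def simplestate(precs):
--     four, two, one = 0,0,0
--
--     for prec_count in precs:
--         if prec_count[0] == 4:
--             four = prec_count[1]
--
--         if prec_count[0] == 2:
--             two = prec_count[1]
--
--         if prec_count[0] == 1:
--             one = prec_count[1]
--
--     while (four % 4) != 0 and two > 0:
--         four += 1; two -= 1
--
--     while (four % 4) != 0 and one > 0:
--         four += 1; one -= 1
--
--     while (two % 8) != 0 and one > 0:
--         two += 1; one -= 1
--
--     return ((1, one), (2, two), (4, four))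
-- ===== SOURCE B (Python) =====
-- def simplestate(precs):
--     last = {}
--     for p, c in precs:
--         last[p] = c
--     four = last.get(4, 0)
--     two = last.get(2, 0)
--     one = last.get(1, 0)
--     t = min((-four) % 4, max(two, 0)); four += t; two -= t
--     t = min((-four) % 4, max(one, 0)); four += t; one -= t
--     t = min((-two) % 8, max(one, 0)); two += t; one -= t
--     return ((1, one), (2, two), (4, four))
-- ===== Notes on version B (the rewrite author's own statement) =====
-- stated objective: simpler
-- what changed: The last-wins scan becomes a dict built in one pass, and each of the three increment-by-1 while loops becomes a single closed-form modular transfer t = min((-x) % m, max(avail, 0)).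
import Mathlib
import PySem

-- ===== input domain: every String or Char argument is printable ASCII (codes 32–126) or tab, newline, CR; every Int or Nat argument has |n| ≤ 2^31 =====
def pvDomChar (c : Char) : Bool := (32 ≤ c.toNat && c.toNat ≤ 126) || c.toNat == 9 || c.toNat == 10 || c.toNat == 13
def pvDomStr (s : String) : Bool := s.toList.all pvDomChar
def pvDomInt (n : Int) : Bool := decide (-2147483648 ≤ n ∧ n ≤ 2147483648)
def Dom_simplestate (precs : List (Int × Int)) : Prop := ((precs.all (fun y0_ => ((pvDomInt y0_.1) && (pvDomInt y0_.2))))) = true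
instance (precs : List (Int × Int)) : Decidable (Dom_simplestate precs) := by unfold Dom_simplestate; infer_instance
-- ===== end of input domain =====

-- B replaces the last-wins scan by a dict pass and each while loop by one closed-form modular transfer (simpler, same cost).
-- ===== PORT A =====
-- one body of A's for-loop: three successive overwrite-ifs on the (four, two, one) state
def pvScanA (st : Int × Int × Int) (pc : Int × Int) : Int × Int × Int :=
  let st := if pc.1 == 4 then (pc.2, st.2.1, st.2.2) else st
  let st := if pc.1 == 2 then (st.1, pc.2, st.2.2) else st
  if pc.1 == 1 then (st.1, st.2.1, pc.2) else st

-- 'while (x % 4) != 0 and a > 0: x += 1; a -= 1'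
def pvWhile4 (x a : Int) : Int × Int :=
  if PySem.Int.mod x 4 ≠ 0 ∧ a > 0 then pvWhile4 (x + 1) (a - 1) else (x, a)
termination_by a.toNat
decreasing_by omega

-- 'while (x % 8) != 0 and a > 0: x += 1; a -= 1'
def pvWhile8 (x a : Int) : Int × Int :=
  if PySem.Int.mod x 8 ≠ 0 ∧ a > 0 then pvWhile8 (x + 1) (a - 1) else (x, a)
termination_by a.toNat
decreasing_by omega

def simplestate (precs : List (Int × Int)) : (Int × Int) × (Int × Int) × (Int × Int) :=
  let s := precs.foldl pvScanA (0, 0, 0)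
  let p1 := pvWhile4 s.1 s.2.1
  let p2 := pvWhile4 p1.1 s.2.2
  let p3 := pvWhile8 p1.2 p2.2
  ((1, p3.2), (2, p3.1), (4, p2.1))

-- ===== PORT B =====
def simplestate_alt (precs : List (Int × Int)) : (Int × Int) × (Int × Int) × (Int × Int) :=
  let last : PySem.Dict Int Int := precs.foldl (fun d p => d.insert p.1 p.2) PySem.Dict.empty
  let four := last.getD 4 0
  let two := last.getD 2 0
  let one := last.getD 1 0
  let t1 := min (PySem.Int.mod (-four) 4) (max two 0)
  let four := four + t1
  let two := two - t1
  let t2 := min (PySem.Int.mod (-four) 4) (max one 0)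
  let four := four + t2
  let one := one - t2
  let t3 := min (PySem.Int.mod (-two) 8) (max one 0)
  let two := two + t3
  let one := one - t3
  ((1, one), (2, two), (4, four))

-- ===== PRECONDITION & SPEC =====
def Spec_simplestate (precs : List (Int × Int)) (out : (Int × Int) × (Int × Int) × (Int × Int)) : Prop := out = simplestate_alt precs
instance (precs : List (Int × Int)) (out : (Int × Int) × (Int × Int) × (Int × Int)) : Decidable (Spec_simplestate precs out) := by unfold Spec_simplestate; infer_instance

-- ===== CLAIM (what is proved, stated in full; the proofs are below) =====
def Claim_equal_simplestate : Prop := ∀ (precs : List (Int × Int)), Dom_simplestate precs → Spec_simplestate precs (simplestate precs)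

-- ===== LEMMAS AND PROOFS =====
lemma pvScanA_insert (d : PySem.Dict Int Int) (pc : Int × Int) :
    pvScanA (d.getD 4 0, d.getD 2 0, d.getD 1 0) pc
      = ((d.insert pc.1 pc.2).getD 4 0, (d.insert pc.1 pc.2).getD 2 0, (d.insert pc.1 pc.2).getD 1 0) := by
  simp only [pvScanA, PySem.Dict.getD_insert]
  split_ifs <;> simp_all

lemma scan_eq (precs : List (Int × Int)) (d : PySem.Dict Int Int) :
    precs.foldl pvScanA (d.getD 4 0, d.getD 2 0, d.getD 1 0)
      = ((precs.foldl (fun d p => d.insert p.1 p.2) d).getD 4 0,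
         (precs.foldl (fun d p => d.insert p.1 p.2) d).getD 2 0,
         (precs.foldl (fun d p => d.insert p.1 p.2) d).getD 1 0) := by
  induction precs generalizing d with
  | nil => rfl
  | cons pc rest ih => simp only [List.foldl_cons, pvScanA_insert, ih]

lemma pvWhile4_eq (x a : Int) :
    pvWhile4 x a = (x + min ((-x) % 4) (max a 0), a - min ((-x) % 4) (max a 0)) := by
  fun_induction pvWhile4 x a with
  | case1 x a h ih =>
    simp only [PySem.Int.mod_eq_emod_of_pos (by norm_num : (0:Int) < 4)] at h
    rw [ih]
    refine Prod.ext ?_ ?_ <;> simp <;> omega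
  | case2 x a h =>
    rw [Decidable.not_and_iff_or_not] at h
    simp only [PySem.Int.mod_eq_emod_of_pos (by norm_num : (0:Int) < 4), not_not, not_lt] at h
    refine Prod.ext ?_ ?_ <;> simp <;> omega

lemma pvWhile8_eq (x a : Int) :
    pvWhile8 x a = (x + min ((-x) % 8) (max a 0), a - min ((-x) % 8) (max a 0)) := by
  fun_induction pvWhile8 x a with
  | case1 x a h ih =>
    simp only [PySem.Int.mod_eq_emod_of_pos (by norm_num : (0:Int) < 8)] at h
    rw [ih]
    refine Prod.ext ?_ ?_ <;> simp <;> omega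
  | case2 x a h =>
    rw [Decidable.not_and_iff_or_not] at h
    simp only [PySem.Int.mod_eq_emod_of_pos (by norm_num : (0:Int) < 8), not_not, not_lt] at h
    refine Prod.ext ?_ ?_ <;> simp <;> omega

-- ===== VERDICT (by name: the statement is the Claim_ definition above) =====
theorem simplestate_spec : Claim_equal_simplestate := by
  intro precs _
  unfold Spec_simplestate simplestate simplestate_alt
  have h0 : ((0 : Int), (0 : Int), (0 : Int))
      = ((PySem.Dict.empty : PySem.Dict Int Int).getD 4 0,
         (PySem.Dict.empty : PySem.Dict Int Int).getD 2 0,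
         (PySem.Dict.empty : PySem.Dict Int Int).getD 1 0) := by
    simp [PySem.Dict.getD_empty]
  rw [h0, scan_eq]
  simp only [pvWhile4_eq, pvWhile8_eq,
    PySem.Int.mod_eq_emod_of_pos (by norm_num : (0:Int) < 4),
    PySem.Int.mod_eq_emod_of_pos (by norm_num : (0:Int) < 8)]
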